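-- pv_equiv track=rewrite | github.com/ARTFL-Project/PhiloLogic5 | python/philologic/runtime/term_expansion.py | _split_literal_prefix
-- ===== SOURCE A (Python) =====
-- _REGEX_METACHARS = frozenset(".*+?[{(\\")
--
-- def _split_literal_prefix(token: str) -> tuple[str, str]:
--     """Split token into (literal_prefix, meta_suffix) at the first unescaped metachar."""
--     i = 0
--     while i < len(token):
--         if token[i] == "\\" and i + 1 < len(token):
--             i += 2
--             continue
--         if token[i] in _REGEX_METACHARS:
--             return token[:i], token[i:]
--         i += 1
--     return token, ""
-- ===== SOURCE B (Python) =====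
-- _REGEX_METACHARS = frozenset(".*+?[{(\\")
--
--
-- def _split_literal_prefix(token: str) -> tuple[str, str]:
--     """Split token into (literal_prefix, meta_suffix) at the first unescaped metachar.
--
--     Instead of simulating the escape-skipping scan, use an arithmetic
--     characterization: position i carries an UNESCAPED metachar exactly when
--     token[i] is a metachar, the maximal run of backslashes ending just before i
--     has even length, and (since '\\' only acts as a split point when nothing
--     follows it) token[i] != '\\' or i is the last index.  Two staged passes:
--     first precompute the run lengths, then pick the first index satisfying the
--     predicate.
--     """
--     n = len(token)
--     runs = []
--     r = 0
--     for ch in token: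
--         runs.append(r)
--         r = r + 1 if ch == "\\" else 0
--     for i, (ch, r) in enumerate(zip(token, runs)):
--         if ch in _REGEX_METACHARS and r % 2 == 0 and (ch != "\\" or i == n - 1):
--             return token[:i], token[i:]
--     return token, ""
-- ===== Notes on version B (the rewrite author's own statement) =====
-- stated objective: alternative
-- what changed: Replaced A's online escape-skipping index scan (i+=2 jumps with lookahead) by two staged passes: precompute the length of the backslash run ending before each position, then pick the first index whose character is a metachar with an even preceding run (a backslash only when it is the last character).
import Mathlib
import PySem

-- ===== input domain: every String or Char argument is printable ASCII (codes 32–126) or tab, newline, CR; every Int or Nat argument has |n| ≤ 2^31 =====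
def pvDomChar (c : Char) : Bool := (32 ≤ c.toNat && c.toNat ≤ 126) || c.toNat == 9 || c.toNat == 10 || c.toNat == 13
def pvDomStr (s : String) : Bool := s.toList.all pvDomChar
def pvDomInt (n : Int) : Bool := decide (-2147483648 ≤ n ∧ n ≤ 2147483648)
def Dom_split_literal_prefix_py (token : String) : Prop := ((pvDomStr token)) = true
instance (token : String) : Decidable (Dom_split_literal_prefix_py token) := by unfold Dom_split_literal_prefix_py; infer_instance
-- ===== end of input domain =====

-- B replaces A's online escape-skipping index scan by two staged passes (precomputed
-- backslash-run lengths, then a parity predicate selecting the split index); alternative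
-- decomposition, same cost.

-- ===== PORT A =====
-- _REGEX_METACHARS = frozenset(".*+?[{(\")
def pvMetas : List Char := ['.', '*', '+', '?', '[', '{', '(', '\\']

-- the while loop of A: index i over the characters, lookahead for escape pairs
def splitA_loop (l : List Char) (i : Nat) : String × String :=
  if h : i < l.length then
    if l[i] = '\\' ∧ i + 1 < l.length then
      splitA_loop l (i + 2)
    else if l[i] ∈ pvMetas then
      (String.ofList (l.take i), String.ofList (l.drop i))
    else
      splitA_loop l (i + 1)
  else
    (String.ofList l, "")
termination_by l.length - i

def split_literal_prefix_py (token : String) : String × String :=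
  splitA_loop token.toList 0

-- ===== PORT B =====
-- B's first pass: runs[i] = length of the backslash run ending just before position i
def runsB : List Char → Nat → List Nat
  | [], _ => []
  | c :: rest, r => r :: runsB rest (if c = '\\' then r + 1 else 0)

-- B's second pass: first index i with (ch, r) satisfying the parity predicate
def findB (n : Nat) : List (Char × Nat) → Nat → Option Nat
  | [], _ => none
  | (c, r) :: rest, i =>
    if c ∈ pvMetas ∧ r % 2 = 0 ∧ (c ≠ '\\' ∨ i = n - 1) then some i
    else findB n rest (i + 1)

def split_literal_prefix_py_alt (token : String) : String × String :=
  let l := token.toList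
  match findB l.length (l.zip (runsB l 0)) 0 with
  | some i => (String.ofList (l.take i), String.ofList (l.drop i))
  | none => (String.ofList l, "")

-- ===== PRECONDITION & SPEC =====
def Spec_split_literal_prefix_py (token : String) (out : String × String) : Prop := out = split_literal_prefix_py_alt token
instance (token : String) (out : String × String) : Decidable (Spec_split_literal_prefix_py token out) := by unfold Spec_split_literal_prefix_py; infer_instance

-- ===== CLAIM (what is proved, stated in full; the proofs are below) =====
def Claim_equal_split_literal_prefix_py : Prop := ∀ (token : String), Dom_split_literal_prefix_py token → Spec_split_literal_prefix_py token (split_literal_prefix_py token)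

-- ===== LEMMAS AND PROOFS =====

-- the length of the literal prefix, as a clean recursion
def pvStop : List Char → Nat
  | [] => 0
  | c :: rest =>
    if c = '\\' then
      match rest with
      | [] => 0
      | _ :: rest' => 2 + pvStop rest'
    else if c ∈ pvMetas then 0 else 1 + pvStop rest

theorem pvStop_nil : pvStop [] = 0 := rfl

theorem pvStop_esc (c : Char) (rest : List Char) :
    pvStop ('\\' :: c :: rest) = 2 + pvStop rest := rfl

theorem pvStop_single_bs : pvStop ['\\'] = 0 := rfl

theorem pvStop_cons (c : Char) (rest : List Char) (h : c ≠ '\\') :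
    pvStop (c :: rest) = if c ∈ pvMetas then 0 else 1 + pvStop rest := by
  cases rest <;> simp [pvStop, h]

theorem runsB_cons (c : Char) (rest : List Char) (r : Nat) :
    runsB (c :: rest) r = r :: runsB rest (if c = '\\' then r + 1 else 0) := rfl

theorem pvStop_le_length (l : List Char) : pvStop l ≤ l.length := by
  fun_induction pvStop l <;> simp_all <;> omega

theorem splitA_loop_eq (l : List Char) (i : Nat) :
    splitA_loop l i =
      (String.ofList (l.take (i + pvStop (l.drop i))), String.ofList (l.drop (i + pvStop (l.drop i)))) := by
  fun_induction splitA_loop l i with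
  | case1 i h hesc ih =>
    obtain ⟨hb, hlt⟩ := hesc
    have hd : l.drop i = l[i] :: l[i + 1]'hlt :: l.drop (i + 2) := by
      rw [List.getElem_cons_drop, List.getElem_cons_drop]
    rw [hd, hb, pvStop_esc]
    rw [show i + (2 + pvStop (l.drop (i + 2))) = i + 2 + pvStop (l.drop (i + 2)) from by omega]
    exact ih
  | case2 i h hesc hmem =>
    have hs : pvStop (l.drop i) = 0 := by
      have hd : l.drop i = l[i] :: l.drop (i + 1) := (List.getElem_cons_drop h).symm
      by_cases hb : l[i] = '\\'
      · have hle : l.length ≤ i + 1 := by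
          by_contra hc; exact hesc ⟨hb, by omega⟩
        have he : l.drop (i + 1) = [] := List.drop_eq_nil_of_le hle
        rw [hd, he, hb]; exact pvStop_single_bs
      · rw [hd, pvStop_cons _ _ hb, if_pos hmem]
    rw [hs]; simp
  | case3 i h hesc hmem ih =>
    have hb : l[i] ≠ '\\' := by
      intro hb
      by_cases hlt : i + 1 < l.length
      · exact hesc ⟨hb, hlt⟩
      · exact hmem (by rw [hb]; simp [pvMetas])
    have hd : l.drop i = l[i] :: l.drop (i + 1) := (List.getElem_cons_drop h).symm
    rw [hd, pvStop_cons _ _ hb, if_neg hmem]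
    rw [show i + (1 + pvStop (l.drop (i + 1))) = i + 1 + pvStop (l.drop (i + 1)) from by omega]
    exact ih
  | case4 i h =>
    have hle : l.length ≤ i := by omega
    have hd : l.drop i = [] := List.drop_eq_nil_of_le hle
    rw [hd, pvStop_nil]
    rw [List.take_of_length_le (by omega), List.drop_eq_nil_of_le (by omega)]

-- B's staged passes compute the same split index as pvStop
theorem findB_eq_aux (m : Nat) :
    ∀ (l : List Char), l.length ≤ m → ∀ (i r n : Nat), r % 2 = 0 → n = i + l.length →
      findB n (l.zip (runsB l r)) i =
        if pvStop l < l.length then some (i + pvStop l) else none := by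
  induction m with
  | zero =>
    intro l h i r n _ _
    have : l = [] := List.eq_nil_of_length_eq_zero (by omega)
    subst this; simp [runsB, findB, pvStop_nil]
  | succ m ih =>
    intro l h i r n hr hn
    match l with
    | [] => simp [runsB, findB, pvStop_nil]
    | c :: rest =>
      by_cases hb : c = '\\'
      · subst hb
        match rest with
        | [] =>
          have hi : i = n - 1 := by
            simp only [List.length_cons, List.length_nil] at hn
            omega
          simp [runsB, findB, pvMetas, hr, hi, pvStop_single_bs]
        | c2 :: rest' =>
          have hni : i ≠ n - 1 := by simp at hn; omega
          have h1 : ¬ ('\\' ∈ pvMetas ∧ r % 2 = 0 ∧ ('\\' ≠ '\\' ∨ i = n - 1)) := by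
            intro ⟨_, _, hc⟩; rcases hc with hc | hc <;> [exact hc rfl; exact hni hc]
          have h2 : ¬ (c2 ∈ pvMetas ∧ (r + 1) % 2 = 0 ∧ (c2 ≠ '\\' ∨ i + 1 = n - 1)) := by
            intro ⟨_, hp, _⟩; omega
          have hrec := ih rest' (by simp at h; omega) (i + 2)
            (if c2 = '\\' then r + 2 else 0) n (by split_ifs <;> omega)
            (by simp only [List.length_cons] at hn ⊢; omega)
          have e1 : runsB ('\\' :: c2 :: rest') r
              = r :: (r + 1) :: runsB rest' (if c2 = '\\' then r + 2 else 0) := by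
            rw [runsB_cons, if_pos rfl, runsB_cons]
          rw [e1]
          simp only [List.zip_cons_cons, findB]
          rw [if_neg h1, if_neg h2, show i + 1 + 1 = i + 2 from rfl, hrec, pvStop_esc]
          simp only [List.length_cons]
          split_ifs with h3 h4 h4 <;> try (first | rfl | omega)
          · rw [show i + (2 + pvStop rest') = i + 2 + pvStop rest' from by omega]
      · by_cases hm : c ∈ pvMetas
        · have hcond : (c ∈ pvMetas ∧ r % 2 = 0 ∧ (c ≠ '\\' ∨ i = n - 1)) := ⟨hm, hr, Or.inl hb⟩
          have hs : pvStop (c :: rest) = 0 := by rw [pvStop_cons _ _ hb, if_pos hm]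
          simp [runsB, findB, hcond, hs]
        · have h1 : ¬ (c ∈ pvMetas ∧ r % 2 = 0 ∧ (c ≠ '\\' ∨ i = n - 1)) := by
            intro ⟨hc, _, _⟩; exact hm hc
          have hrec := ih rest (by simp at h; omega) (i + 1) 0 n (by omega)
            (by simp at hn ⊢; omega)
          simp only [runsB, findB, List.zip_cons_cons, if_neg h1, if_neg hb]
          rw [hrec, pvStop_cons _ _ hb, if_neg hm]
          simp only [List.length_cons]
          split_ifs with h3 h4 h4 <;> try (first | rfl | omega)
          · rw [show i + (1 + pvStop rest) = i + 1 + pvStop rest from by omega]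

theorem findB_eq (l : List Char) :
    findB l.length (l.zip (runsB l 0)) 0 =
      if pvStop l < l.length then some (pvStop l) else none := by
  simpa using findB_eq_aux l.length l (le_refl _) 0 0 l.length rfl (by simp)

-- ===== VERDICT (by name: the statement is the Claim_ definition above) =====
theorem split_literal_prefix_py_spec : Claim_equal_split_literal_prefix_py := by
  intro token _
  unfold Spec_split_literal_prefix_py split_literal_prefix_py split_literal_prefix_py_alt
  rw [splitA_loop_eq]
  simp only [List.drop_zero, Nat.zero_add, findB_eq]
  split_ifs with h
  · rfl
  · have hle := pvStop_le_length token.toList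
    have he : pvStop token.toList = token.toList.length := by omega
    rw [he, List.take_length, List.drop_length]
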